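-- pv_equiv track=rewrite | github.com/tuanpfiev/HAB | utils/common.py | extract_str_btw_curly_brackets
-- ===== SOURCE A (Python) =====
-- def extract_str_btw_curly_brackets(data_str):
--     string_list = []
--     iterator = data_str.find('{')
--
--     while data_str.find('}', iterator) != -1:
--         substring_end = data_str.find('}', iterator)
--         string_list.append(data_str[iterator:substring_end + 1])
--         iterator = substring_end + 1
--     return string_list
-- ===== SOURCE B (Python) =====
-- def extract_str_btw_curly_brackets(data_str):
--     # single left-to-right scan of the suffix starting at the first '{'
--     # (find() == -1 naturally yields the one-character suffix, as in the original)
--     suffix = data_str[data_str.find('{'):]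
--     out = []
--     buf = ''
--     for ch in suffix:
--         buf += ch
--         if ch == '}':
--             out.append(buf)
--             buf = ''
--     return out
-- ===== Notes on version B (the rewrite author's own statement) =====
-- stated objective: simpler
-- what changed: Replaces A's while-loop that chains find('}', iterator) index arithmetic and slicing with a single character scan of the suffix starting at the first '{', accumulating a buffer that is emitted at each '}'.
import Mathlib
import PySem

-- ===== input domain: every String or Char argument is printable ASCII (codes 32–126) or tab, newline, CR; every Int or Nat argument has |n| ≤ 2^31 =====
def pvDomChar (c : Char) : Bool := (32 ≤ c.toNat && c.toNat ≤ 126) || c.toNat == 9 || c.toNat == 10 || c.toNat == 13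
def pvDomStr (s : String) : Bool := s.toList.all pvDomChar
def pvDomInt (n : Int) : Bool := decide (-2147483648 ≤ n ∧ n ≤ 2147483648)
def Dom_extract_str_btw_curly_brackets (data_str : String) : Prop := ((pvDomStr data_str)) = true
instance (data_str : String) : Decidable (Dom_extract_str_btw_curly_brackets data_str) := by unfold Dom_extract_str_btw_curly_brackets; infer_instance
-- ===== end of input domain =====

-- B replaces A's index-chaining with repeated find('}') by one left-to-right scan of the
-- suffix starting at the first '{' (objective: simpler); both return the same list everywhere.

-- ===== PORT A =====
-- A's while loop; fuel = length + 1 suffices since the iterator moves strictly past each found '}'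
def pvLoopA (cs : List Char) : Nat → List String → Int → List String
  | 0, acc, _ => acc
  | fuel+1, acc, it =>
    let e := PySem.Chars.findFrom cs ['}'] it none
    if e = -1 then acc
    else pvLoopA cs fuel (acc ++ [String.ofList (PySem.Chars.slice cs (some it) (some (e+1)))]) (e+1)

def extract_str_btw_curly_brackets (data_str : String) : List String :=
  pvLoopA data_str.toList (data_str.toList.length + 1) [] (PySem.Chars.find data_str.toList ['{'])

-- ===== PORT B =====
-- the accumulator scan of Source B: buf grows char by char, emitted when the char is '}'
def pvScanB : List Char → List Char → List (List Char)
  | [], _ => []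
  | c :: rest, buf =>
    let buf' := buf ++ [c]
    if c = '}' then buf' :: pvScanB rest [] else pvScanB rest buf'

def extract_str_btw_curly_brackets_alt (data_str : String) : List String :=
  (pvScanB
    (PySem.Chars.slice data_str.toList (some (PySem.Chars.find data_str.toList ['{'])) none)
    []).map String.ofList

-- ===== PRECONDITION & SPEC =====
def Spec_extract_str_btw_curly_brackets (data_str : String) (out : List String) : Prop := out = extract_str_btw_curly_brackets_alt data_str
instance (data_str : String) (out : List String) : Decidable (Spec_extract_str_btw_curly_brackets data_str out) := by unfold Spec_extract_str_btw_curly_brackets; infer_instance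

-- ===== CLAIM (what is proved, stated in full; the proofs are below) =====
def Claim_equal_extract_str_btw_curly_brackets : Prop := ∀ (data_str : String), Dom_extract_str_btw_curly_brackets data_str → Spec_extract_str_btw_curly_brackets data_str (extract_str_btw_curly_brackets data_str)

-- ===== LEMMAS AND PROOFS =====

-- canonical chunk list: maximal '}'-terminated runs, trailing tail dropped
def pvChunks : List Char → List (List Char)
  | [] => []
  | c :: rest =>
    if c = '}' then [c] :: pvChunks rest
    else match pvChunks rest with
      | [] => []
      | h :: r => (c :: h) :: r

theorem pvGo (c : Char) : ∀ (cs : List Char) (k : Nat),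
    PySem.Chars.find.go [c] cs k = if c ∈ cs then ((k + cs.idxOf c : Nat) : Int) else -1 := by
  intro cs
  induction cs with
  | nil => intro k; simp [PySem.Chars.find.go]
  | cons a rest ih =>
    intro k
    by_cases h : c = a
    · subst h
      simp [PySem.Chars.find.go, List.isPrefixOf]
    · have hne : ¬ (c == a) = true := by simp [h]
      have hf : (a == c) = false := by simp; exact fun hh => h hh.symm
      simp only [PySem.Chars.find.go, List.isPrefixOf, hne, Bool.false_and, ih (k+1)]
      by_cases hm : c ∈ rest
      · simp [hm, List.mem_cons, h, List.idxOf_cons, hf]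
        ring
      · have hnm : c ∉ a :: rest := by simp [h, hm]
        simp [hm, hnm]

theorem pvFind_singleton (cs : List Char) (c : Char) :
    PySem.Chars.find cs [c] = if c ∈ cs then (cs.idxOf c : Int) else -1 := by
  simp [PySem.Chars.find, pvGo]

theorem pvChunks_nomem (cs : List Char) (h : '}' ∉ cs) : pvChunks cs = [] := by
  induction cs with
  | nil => rfl
  | cons a rest ih =>
    have h1 : a ≠ '}' := fun hc => h (by simp [hc])
    have h2 : '}' ∉ rest := fun hc => h (by simp [hc])
    simp [pvChunks, h1, ih h2]

theorem pvChunks_mem (cs : List Char) (h : '}' ∈ cs) :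
    pvChunks cs = cs.take (cs.idxOf '}' + 1) :: pvChunks (cs.drop (cs.idxOf '}' + 1)) := by
  induction cs with
  | nil => cases h
  | cons a rest ih =>
    by_cases ha : a = '}'
    · subst ha; simp [pvChunks]
    · have hm : '}' ∈ rest := (List.mem_cons.mp h).resolve_left (fun hh => ha hh.symm)
      have hf : (a == '}') = false := by simp [ha]
      simp only [pvChunks, if_neg ha, ih hm, List.idxOf_cons, hf]
      simp

theorem pvScanB_eq (cs : List Char) : ∀ buf,
    pvScanB cs buf = match pvChunks cs with
      | [] => []
      | h :: r => (buf ++ h) :: r := by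
  induction cs with
  | nil => intro buf; simp [pvScanB, pvChunks]
  | cons c rest ih =>
    intro buf
    by_cases hc : c = '}'
    · subst hc
      simp only [pvScanB, pvChunks, ih []]
      cases pvChunks rest <;> simp
    · simp only [pvScanB, pvChunks, if_neg hc, ih (buf ++ [c])]
      cases pvChunks rest <;> simp

theorem pvScanB_nil (cs : List Char) : pvScanB cs [] = pvChunks cs := by
  rw [pvScanB_eq]
  cases pvChunks cs <;> simp

theorem pvLoopA_eq (cs : List Char) : ∀ (fuel : Nat) (it : Nat) (acc : List String),
    it ≤ cs.length → cs.length - it < fuel →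
    pvLoopA cs fuel acc (it : Int) = acc ++ (pvChunks (cs.drop it)).map String.ofList := by
  intro fuel
  induction fuel with
  | zero => intro it acc _ h2; omega
  | succ fuel ih =>
    intro it acc h1 h2
    rw [pvLoopA]
    rw [PySem.Chars.findFrom_natCast cs ['}'] it h1]
    rw [pvFind_singleton]
    by_cases hm : '}' ∈ cs.drop it
    · set i := (cs.drop it).idxOf '}' with hi
      have hilt : i < cs.length - it := by
        have := List.idxOf_lt_length_of_mem hm
        simpa using this
      simp only [if_pos hm]
      rw [if_neg (by omega : ¬ ((i : Int)) = -1)]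
      rw [if_neg (by omega : ¬ ((it : Int) + (i : Int)) = -1)]
      have harg : ((it : Int) + (i : Int)) + 1 = ((it + (i + 1) : Nat) : Int) := by push_cast; ring
      rw [harg]
      rw [ih (it + (i + 1)) _ (by omega) (by omega)]
      have hsl : PySem.Chars.slice cs (some (it : Int)) (some ((it + (i + 1) : Nat) : Int)) =
          (cs.drop it).take (i + 1) := by
        have : ((it + (i + 1) : Nat) : Int) = (it : Int) + ((i + 1 : Nat) : Int) := by push_cast; ring
        rw [this]
        exact PySem.List.slice_natCast_add cs it (i + 1)
      rw [hsl]
      rw [pvChunks_mem _ hm]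
      simp [List.drop_drop, hi]
    · simp only [if_neg hm, pvChunks_nomem _ hm, List.map_nil, List.append_nil]
      simp

theorem pvFindFrom_neg_one (cs : List Char) :
    PySem.Chars.findFrom cs ['}'] (-1) none =
      if '}' ∈ cs.drop (cs.length - 1) then ((cs.length - 1 : Nat) : Int) else -1 := by
  rcases eq_or_ne cs [] with rfl | hcs
  · decide
  · have hn : 1 ≤ cs.length := List.length_pos_of_ne_nil hcs
    have hlen1 : (cs.drop (cs.length - 1)).length = 1 := by
      rw [List.length_drop]; omega
    simp only [PySem.Chars.findFrom]
    rw [if_pos (by omega : (-1 : Int) < 0)]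
    rw [if_neg (by omega : ¬ ((-1 : Int) + cs.length < 0))]
    rw [if_neg (by omega : ¬ ((cs.length : Int) < -1 + cs.length))]
    have htn : ((-1 : Int) + cs.length).toNat = cs.length - 1 := by omega
    have hte : ((cs.length : Int)).toNat = cs.length := by omega
    rw [htn, hte, List.take_length, pvFind_singleton]
    by_cases hmem : '}' ∈ cs.drop (cs.length - 1)
    · have hidx : (cs.drop (cs.length - 1)).idxOf '}' = 0 := by
        have := List.idxOf_lt_length_of_mem hmem
        omega
      rw [if_pos hmem, hidx]
      rw [if_neg (by omega : ¬ ((0 : Nat) : Int) = -1)]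
      rw [if_pos hmem]
      push_cast
      omega
    · rw [if_neg hmem]
      simp [hmem]

-- ===== VERDICT (by name: the statement is the Claim_ definition above) =====
theorem extract_str_btw_curly_brackets_spec : Claim_equal_extract_str_btw_curly_brackets := by
  intro s _
  unfold Spec_extract_str_btw_curly_brackets extract_str_btw_curly_brackets
    extract_str_btw_curly_brackets_alt
  rw [pvFind_singleton]
  by_cases hm : '{' ∈ s.toList
  · rw [if_pos hm]
    have hidx : s.toList.idxOf '{' < s.toList.length := List.idxOf_lt_length_of_mem hm
    rw [pvLoopA_eq s.toList (s.toList.length + 1) (s.toList.idxOf '{') [] (le_of_lt hidx)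
      (by omega)]
    have hsf : PySem.Chars.slice s.toList (some ((s.toList.idxOf '{' : Nat) : Int)) none =
        s.toList.drop (s.toList.idxOf '{') := by
      show PySem.List.slice s.toList (some ((s.toList.idxOf '{' : Nat) : Int)) none =
        s.toList.drop (s.toList.idxOf '{')
      rw [PySem.List.slice_from s.toList (by omega)]
      simp
    rw [hsf, pvScanB_nil]
    simp
  · rw [if_neg hm]
    have hsf : PySem.Chars.slice s.toList (some (-1)) none =
        s.toList.drop (s.toList.length - 1) := by
      show PySem.List.slice s.toList (some (-1)) none = s.toList.drop (s.toList.length - 1)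
      exact PySem.List.slice_from_neg_one s.toList
    rw [hsf, pvScanB_nil]
    rw [pvLoopA]
    rw [pvFindFrom_neg_one]
    by_cases hlast : '}' ∈ s.toList.drop (s.toList.length - 1)
    · have hne : s.toList ≠ [] := by rintro h0; rw [h0] at hlast; simp at hlast
      have hn : 1 ≤ s.toList.length := List.length_pos_of_ne_nil hne
      have hlen1 : (s.toList.drop (s.toList.length - 1)).length = 1 := by
        rw [List.length_drop]; omega
      obtain ⟨c, hc⟩ := List.length_eq_one_iff.mp hlen1
      have hcb : '}' = c := by rw [hc] at hlast; simpa using hlast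
      subst hcb
      rw [if_pos hlast]
      rw [if_neg (by omega : ¬ ((s.toList.length - 1 : Nat) : Int) = -1)]
      have harg : ((s.toList.length - 1 : Nat) : Int) + 1 = ((s.toList.length : Nat) : Int) := by
        omega
      rw [harg]
      rw [pvLoopA_eq s.toList s.toList.length s.toList.length _ le_rfl (by omega)]
      have hsl : PySem.Chars.slice s.toList (some (-1)) (some ((s.toList.length : Nat) : Int)) =
          s.toList.drop (s.toList.length - 1) := by
        show PySem.List.slice s.toList (some (-1)) (some ((s.toList.length : Nat) : Int)) =
          s.toList.drop (s.toList.length - 1)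
        simp only [PySem.List.slice, PySem.List.clampIdx_neg_one, PySem.List.clampIdx_natCast]
        have h1 : min (s.toList.length : Nat) s.toList.length - (s.toList.length - 1) = 1 := by
          omega
        rw [h1]
        rw [hc]
        simp
      rw [hsl, hc]
      have hdn : List.drop s.length s.toList = [] := List.drop_eq_nil_of_le (by simp)
      simp [pvChunks, hdn]
    · rw [if_neg hlast]
      rw [if_pos rfl]
      rw [pvChunks_nomem _ hlast]
      simp
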